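-- pv_equiv track=rewrite | github.com/Shree987/AutoPart-ML-Project | metrics.py | CalculateDij
-- ===== SOURCE A (Python) =====
-- def CalculateDij(D, G, i, j, x = -2):
-- 	Dij, Dji = 0, 0
-- 	N = len(D)
-- 	for I  in range(N):
-- 		if I == x:
-- 			continue
-- 		if G[I] == i:
-- 			for J in range(N):
-- 				if J == x:
-- 					continue
-- 				if J == j:
-- 					Dij += D[I][J]
--
-- 		if G[I] == j:
-- 			for J in range(N):
-- 				if J == x:
-- 					continue
-- 				if J == i:
-- 					Dji += D[J][I]
--
-- 	return Dij, Dji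
-- ===== SOURCE B (Python) =====
-- def CalculateDij(D, G, i, j, x=-2):
--     # Drop the inner scans: D[I][j] / D[i][I] are indexed directly, and the
--     # whole sum is 0 when j (resp. i) is out of range or equals x.
--     N = len(D)
--     Dij = 0
--     Dji = 0
--     if 0 <= j < N and j != x:
--         Dij = sum(D[I][j] for I in range(N) if I != x and G[I] == i)
--     if 0 <= i < N and i != x:
--         Dji = sum(D[i][I] for I in range(N) if I != x and G[I] == j)
--     return Dij, Dji
-- ===== Notes on version B (the rewrite author's own statement) =====
-- stated objective: alternative
-- what changed: B drops A's two inner range(N) scans: each component becomes one guarded filtered sum that indexes D[I][j] / D[i][I] directly and is 0 when j (resp. i) is out of range or equals x.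
import Mathlib
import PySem

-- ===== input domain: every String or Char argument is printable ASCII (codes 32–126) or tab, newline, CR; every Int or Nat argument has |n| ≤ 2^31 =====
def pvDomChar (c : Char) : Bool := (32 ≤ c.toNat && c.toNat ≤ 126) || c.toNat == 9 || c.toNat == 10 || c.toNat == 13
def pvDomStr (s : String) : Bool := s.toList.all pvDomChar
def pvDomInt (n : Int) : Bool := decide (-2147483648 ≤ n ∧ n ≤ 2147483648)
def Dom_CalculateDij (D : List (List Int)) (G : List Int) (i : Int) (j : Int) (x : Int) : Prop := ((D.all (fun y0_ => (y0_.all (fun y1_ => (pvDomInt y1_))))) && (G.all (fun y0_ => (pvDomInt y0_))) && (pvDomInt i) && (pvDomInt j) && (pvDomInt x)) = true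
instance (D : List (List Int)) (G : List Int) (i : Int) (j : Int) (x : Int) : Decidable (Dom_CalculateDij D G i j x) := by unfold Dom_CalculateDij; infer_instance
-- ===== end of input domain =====

-- B replaces A's double scan by direct indexing D[I][j] / D[i][I] (zero when j / i is out of
-- range or equals x): one guarded filtered sum per component instead of nested loops.

-- ===== PORT A =====
-- literal port of A: outer loop over range(N) with state (Dij, Dji); two inner loops over range(N)
def CalculateDij (D : List (List Int)) (G : List Int) (i : Int) (j : Int) (x : Int) : Int × Int :=
  let N : Int := D.length
  (PySem.List.pyRange 0 N 1).foldl (fun (s : Int × Int) I =>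
    if I = x then s
    else
      let s1 :=
        if PySem.List.pyGetD G I 0 = i then
          (PySem.List.pyRange 0 N 1).foldl (fun (t : Int × Int) J =>
            if J = x then t
            else if J = j then (t.1 + PySem.List.pyGetD (PySem.List.pyGetD D I []) J 0, t.2)
            else t) s
        else s
      if PySem.List.pyGetD G I 0 = j then
        (PySem.List.pyRange 0 N 1).foldl (fun (t : Int × Int) J =>
          if J = x then t
          else if J = i then (t.1, t.2 + PySem.List.pyGetD (PySem.List.pyGetD D J []) I 0)
          else t) s1
      else s1) ((0 : Int), (0 : Int))

-- ===== PORT B =====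
-- port of Source B: each component is a single filtered sum over range(N), guarded by the
-- range test on j (resp. i)
def CalculateDij_alt (D : List (List Int)) (G : List Int) (i : Int) (j : Int) (x : Int) : Int × Int :=
  let N : Int := D.length
  let Dij : Int :=
    if 0 ≤ j ∧ j < N ∧ j ≠ x then
      (((PySem.List.pyRange 0 N 1).filter
          (fun I => decide (I ≠ x ∧ PySem.List.pyGetD G I 0 = i))).map
        (fun I => PySem.List.pyGetD (PySem.List.pyGetD D I []) j 0)).sum
    else 0
  let Dji : Int :=
    if 0 ≤ i ∧ i < N ∧ i ≠ x then
      (((PySem.List.pyRange 0 N 1).filter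
          (fun I => decide (I ≠ x ∧ PySem.List.pyGetD G I 0 = j))).map
        (fun I => PySem.List.pyGetD (PySem.List.pyGetD D i []) I 0)).sum
    else 0
  (Dij, Dji)

-- ===== PRECONDITION & SPEC =====
-- Pre_ excludes exactly the inputs on which Python A raises IndexError: some needed G[I],
-- D[I][j] or D[i][I] access out of range.
def Pre_CalculateDij (D : List (List Int)) (G : List Int) (i : Int) (j : Int) (x : Int) : Prop :=
  (∀ I ∈ PySem.List.pyRange 0 (D.length : Int) 1, I ≠ x → I < (G.length : Int)) ∧
  ((0 ≤ j ∧ j < (D.length : Int) ∧ j ≠ x) →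
    ∀ I ∈ PySem.List.pyRange 0 (D.length : Int) 1, I ≠ x → PySem.List.pyGetD G I 0 = i →
      j < ((PySem.List.pyGetD D I []).length : Int)) ∧
  ((0 ≤ i ∧ i < (D.length : Int) ∧ i ≠ x) →
    ∀ I ∈ PySem.List.pyRange 0 (D.length : Int) 1, I ≠ x → PySem.List.pyGetD G I 0 = j →
      I < ((PySem.List.pyGetD D i []).length : Int))
instance (D : List (List Int)) (G : List Int) (i : Int) (j : Int) (x : Int) : Decidable (Pre_CalculateDij D G i j x) := by unfold Pre_CalculateDij; infer_instance

def pvWitness_CalculateDij : List (List Int) × List Int × Int × Int × Int :=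
  ([[1, 2], [3, 4]], [0, 1], 0, 1, -2)

def Spec_CalculateDij (D : List (List Int)) (G : List Int) (i : Int) (j : Int) (x : Int) (out : Int × Int) : Prop := out = CalculateDij_alt D G i j x
instance (D : List (List Int)) (G : List Int) (i : Int) (j : Int) (x : Int) (out : Int × Int) : Decidable (Spec_CalculateDij D G i j x out) := by unfold Spec_CalculateDij; infer_instance

-- ===== CLAIM (what is proved, stated in full; the proofs are below) =====
def Claim_equal_CalculateDij : Prop := ∀ (D : List (List Int)) (G : List Int) (i : Int) (j : Int) (x : Int), Dom_CalculateDij D G i j x → Pre_CalculateDij D G i j x → Spec_CalculateDij D G i j x (CalculateDij D G i j x)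

-- ===== LEMMAS AND PROOFS =====

-- A's inner loop: it adds f j to the first component exactly once, iff j occurs in the
-- (duplicate-free) index list and j ≠ x.
theorem pvInner1 (x j : Int) (f : Int → Int) (L : List Int) (hnd : L.Nodup) (t : Int × Int) :
    L.foldl (fun (t : Int × Int) J =>
        if J = x then t else if J = j then (t.1 + f J, t.2) else t) t
      = (t.1 + (if j ∈ L ∧ j ≠ x then f j else 0), t.2) := by
  induction L generalizing t with
  | nil => simp
  | cons a L ih =>
    have hnd' := hnd.of_cons
    simp only [List.foldl_cons]
    by_cases hax : a = x
    · subst hax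
      simp only [ih hnd']
      by_cases hj : j = a
      · simp [hj]
      · simp [List.mem_cons, fun h : j = a => hj h]
    · rw [if_neg hax]
      by_cases haj : a = j
      · subst haj
        have hnm : a ∉ L := (List.nodup_cons.mp hnd).1
        rw [if_pos rfl, ih hnd']
        have h1 : ¬ (a ∈ L ∧ a ≠ x) := fun h => hnm h.1
        have h2 : a ∈ a :: L ∧ a ≠ x := ⟨List.mem_cons_self, hax⟩
        rw [if_neg h1, if_pos h2]
        simp
      · rw [if_neg haj, ih hnd']
        have : (j ∈ a :: L ∧ j ≠ x) ↔ (j ∈ L ∧ j ≠ x) := by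
          constructor
          · rintro ⟨hm, hx⟩
            rcases List.mem_cons.mp hm with h | h
            · exact absurd h.symm haj
            · exact ⟨h, hx⟩
          · exact fun h => ⟨List.mem_cons_of_mem _ h.1, h.2⟩
        rw [if_congr this rfl rfl]

-- same for the second inner loop / second component
theorem pvInner2 (x i : Int) (f : Int → Int) (L : List Int) (hnd : L.Nodup) (t : Int × Int) :
    L.foldl (fun (t : Int × Int) J =>
        if J = x then t else if J = i then (t.1, t.2 + f J) else t) t
      = (t.1, t.2 + (if i ∈ L ∧ i ≠ x then f i else 0)) := by
  induction L generalizing t with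
  | nil => simp
  | cons a L ih =>
    have hnd' := hnd.of_cons
    simp only [List.foldl_cons]
    by_cases hax : a = x
    · subst hax
      simp only [ih hnd']
      by_cases hj : i = a
      · simp [hj]
      · simp [List.mem_cons, fun h : i = a => hj h]
    · rw [if_neg hax]
      by_cases haj : a = i
      · subst haj
        have hnm : a ∉ L := (List.nodup_cons.mp hnd).1
        rw [if_pos rfl, ih hnd']
        have h1 : ¬ (a ∈ L ∧ a ≠ x) := fun h => hnm h.1
        have h2 : a ∈ a :: L ∧ a ≠ x := ⟨List.mem_cons_self, hax⟩
        rw [if_neg h1, if_pos h2]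
        simp
      · rw [if_neg haj, ih hnd']
        have : (i ∈ a :: L ∧ i ≠ x) ↔ (i ∈ L ∧ i ≠ x) := by
          constructor
          · rintro ⟨hm, hx⟩
            rcases List.mem_cons.mp hm with h | h
            · exact absurd h.symm haj
            · exact ⟨h, hx⟩
          · exact fun h => ⟨List.mem_cons_of_mem _ h.1, h.2⟩
        rw [if_congr this rfl rfl]

-- a fold of componentwise additions is the pair of the two sums
theorem pvFoldPair (a b : Int → Int) (L : List Int) (s : Int × Int) :
    L.foldl (fun (s : Int × Int) I => (s.1 + a I, s.2 + b I)) s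
      = (s.1 + (L.map a).sum, s.2 + (L.map b).sum) := by
  induction L generalizing s with
  | nil => simp
  | cons c L ih => simp [ih]; constructor <;> ring

-- sum over a filtered list = sum of the if-guarded terms over the whole list
theorem pvSumFilter (p : Int → Prop) [DecidablePred p] (f : Int → Int) (L : List Int) :
    ((L.filter (fun I => decide (p I))).map f).sum
      = (L.map (fun I => if p I then f I else 0)).sum := by
  induction L with
  | nil => simp
  | cons a L ih =>
    by_cases h : p a
    · simp [h, ih]
    · simp [h, ih]


-- ===== VERDICT helper =====
theorem pvMain (D : List (List Int)) (G : List Int) (i j x : Int) :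
    CalculateDij D G i j x = CalculateDij_alt D G i j x := by
  unfold CalculateDij CalculateDij_alt
  simp only []
  set R := PySem.List.pyRange 0 ((D.length : Int)) 1 with hR
  have hnd : R.Nodup := PySem.List.nodup_pyRange_one 0 ((D.length : Int))
  have hjR : (j ∈ R) = (0 ≤ j ∧ j < (D.length : Int)) := by
    rw [hR]; simp [PySem.List.mem_pyRange_one]
  have hiR : (i ∈ R) = (0 ≤ i ∧ i < (D.length : Int)) := by
    rw [hR]; simp [PySem.List.mem_pyRange_one]
  have hstep := PySem.List.foldl_congr_mem R
    (fun (s : Int × Int) I =>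
      if I = x then s
      else
        let s1 :=
          if PySem.List.pyGetD G I 0 = i then
            R.foldl (fun (t : Int × Int) J =>
              if J = x then t
              else if J = j then (t.1 + PySem.List.pyGetD (PySem.List.pyGetD D I []) J 0, t.2)
              else t) s
          else s
        if PySem.List.pyGetD G I 0 = j then
          R.foldl (fun (t : Int × Int) J =>
            if J = x then t
            else if J = i then (t.1, t.2 + PySem.List.pyGetD (PySem.List.pyGetD D J []) I 0)
            else t) s1
        else s1)
    (fun (s : Int × Int) I =>
      (s.1 + (if I ≠ x ∧ PySem.List.pyGetD G I 0 = i ∧ j ∈ R ∧ j ≠ x then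
                PySem.List.pyGetD (PySem.List.pyGetD D I []) j 0 else 0),
       s.2 + (if I ≠ x ∧ PySem.List.pyGetD G I 0 = j ∧ i ∈ R ∧ i ≠ x then
                PySem.List.pyGetD (PySem.List.pyGetD D i []) I 0 else 0)))
    ((0 : Int), (0 : Int))
    (by
      intro s I _
      by_cases hIx : I = x
      · simp [hIx]
      · simp only [if_neg hIx]
        rw [pvInner1 x j (fun J => PySem.List.pyGetD (PySem.List.pyGetD D I []) J 0) R hnd s]
        by_cases hgi : PySem.List.pyGetD G I 0 = i <;>
          by_cases hgj : PySem.List.pyGetD G I 0 = j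
        · simp only [if_pos hgi, if_pos hgj]
          rw [pvInner2 x i (fun J => PySem.List.pyGetD (PySem.List.pyGetD D J []) I 0) R hnd]
          have hij : i = j := hgi.symm.trans hgj
          simp [hIx, hgi, hgj, hij]
        · simp only [if_pos hgi, if_neg hgj]
          have hij : ¬ i = j := fun h => hgj (hgi.trans h)
          simp [hIx, hgi, hgj, hij]
        · simp only [if_neg hgi, if_pos hgj]
          rw [pvInner2 x i (fun J => PySem.List.pyGetD (PySem.List.pyGetD D J []) I 0) R hnd]
          have hji : ¬ j = i := fun h => hgi (hgj.trans h)
          simp [hIx, hgi, hgj, hji]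
        · simp only [if_neg hgi, if_neg hgj]
          simp [hIx, hgi, hgj])
  rw [hstep, pvFoldPair]
  refine Prod.ext ?_ ?_
  · simp only [zero_add]
    by_cases hc : 0 ≤ j ∧ j < (D.length : Int) ∧ j ≠ x
    · rw [if_pos hc,
        pvSumFilter (fun I => I ≠ x ∧ PySem.List.pyGetD G I 0 = i)
          (fun I => PySem.List.pyGetD (PySem.List.pyGetD D I []) j 0) R]
      apply congrArg List.sum
      apply List.map_congr_left
      intro I _
      have : (I ≠ x ∧ PySem.List.pyGetD G I 0 = i ∧ j ∈ R ∧ j ≠ x)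
           ↔ (I ≠ x ∧ PySem.List.pyGetD G I 0 = i) := by
        rw [hjR]; tauto
      rw [if_congr this rfl rfl]
    · rw [if_neg hc]
      have hz : ∀ I ∈ R, (if I ≠ x ∧ PySem.List.pyGetD G I 0 = i ∧ j ∈ R ∧ j ≠ x then
          PySem.List.pyGetD (PySem.List.pyGetD D I []) j 0 else 0) = 0 := by
        intro I _
        have : ¬ (I ≠ x ∧ PySem.List.pyGetD G I 0 = i ∧ j ∈ R ∧ j ≠ x) := by
          rw [hjR]; tauto
        rw [if_neg this]
      rw [List.map_congr_left hz]
      simp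
  · simp only [zero_add]
    by_cases hc : 0 ≤ i ∧ i < (D.length : Int) ∧ i ≠ x
    · rw [if_pos hc,
        pvSumFilter (fun I => I ≠ x ∧ PySem.List.pyGetD G I 0 = j)
          (fun I => PySem.List.pyGetD (PySem.List.pyGetD D i []) I 0) R]
      apply congrArg List.sum
      apply List.map_congr_left
      intro I _
      have : (I ≠ x ∧ PySem.List.pyGetD G I 0 = j ∧ i ∈ R ∧ i ≠ x)
           ↔ (I ≠ x ∧ PySem.List.pyGetD G I 0 = j) := by
        rw [hiR]; tauto
      rw [if_congr this rfl rfl]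
    · rw [if_neg hc]
      have hz : ∀ I ∈ R, (if I ≠ x ∧ PySem.List.pyGetD G I 0 = j ∧ i ∈ R ∧ i ≠ x then
          PySem.List.pyGetD (PySem.List.pyGetD D i []) I 0 else 0) = 0 := by
        intro I _
        have : ¬ (I ≠ x ∧ PySem.List.pyGetD G I 0 = j ∧ i ∈ R ∧ i ≠ x) := by
          rw [hiR]; tauto
        rw [if_neg this]
      rw [List.map_congr_left hz]
      simp

-- ===== VERDICT (by name: the statement is the Claim_ definition above) =====
theorem CalculateDij_spec : Claim_equal_CalculateDij := by
  intro D G i j x _ _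
  unfold Spec_CalculateDij
  exact pvMain D G i j x
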